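-- pv_equiv track=rewrite | github.com/matheus-lima-silva/lima-sites | lima/bot/handlers/busca_codigo.py | _limpar_formatacao_markdown
-- ===== SOURCE A (Python) =====
-- def _limpar_formatacao_markdown(texto: str) -> str:
--     """Remove todos os caracteres especiais do MarkdownV2 para fallback."""
--     caracteres_especiais = [
--         '*',
--         '_',
--         '`',
--         '\\',
--         '[',
--         ']',
--         '(',
--         ')',
--         '~',
--         '>',
--         '#',
--         '+',
--         '-',
--         '=',
--         '|',
--         '{',
--         '}',
--         '.',
--         '!',
--     ]
--     texto_limpo = texto
--     for char in caracteres_especiais: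
--         texto_limpo = texto_limpo.replace(char, '')
--     return texto_limpo
-- ===== SOURCE B (Python) =====
-- def _limpar_formatacao_markdown(texto: str) -> str:
--     """Remove todos os caracteres especiais do MarkdownV2 para fallback."""
--     especiais = set('*_`\\[]()~>#+-=|{}.!')
--     return ''.join(c for c in texto if c not in especiais)
-- ===== Notes on version B (the rewrite author's own statement) =====
-- stated objective: idiomatic
-- what changed: Replaces A's 19 successive str.replace passes (one full scan of the string per special character) with a single filtering pass over the input using a precomputed set of the special characters.
import Mathlib
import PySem

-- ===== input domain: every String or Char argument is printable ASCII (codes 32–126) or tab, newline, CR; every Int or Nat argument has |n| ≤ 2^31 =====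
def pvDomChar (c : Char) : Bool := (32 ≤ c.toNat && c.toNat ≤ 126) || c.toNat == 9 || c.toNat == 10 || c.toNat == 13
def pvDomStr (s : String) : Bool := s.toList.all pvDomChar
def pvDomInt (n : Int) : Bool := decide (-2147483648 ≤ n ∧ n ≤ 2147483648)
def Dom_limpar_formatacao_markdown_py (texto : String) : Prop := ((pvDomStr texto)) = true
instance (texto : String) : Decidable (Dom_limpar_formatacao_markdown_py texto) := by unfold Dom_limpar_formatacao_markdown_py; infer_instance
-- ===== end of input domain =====

-- B replaces A's 19 successive str.replace passes with one filtering pass over the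
-- input against a precomputed set of the special characters (idiomatic; same result).

-- ===== PORT A =====
-- A's list of special characters (each a one-character string, as in the Python)
def pvCaracteresEspeciais : List String :=
  ["*", "_", "`", "\\", "[", "]", "(", ")", "~", ">", "#", "+", "-", "=", "|", "{", "}", ".", "!"]

def limpar_formatacao_markdown_py (texto : String) : String :=
  pvCaracteresEspeciais.foldl
    (fun texto_limpo ch => PySem.Str.replace texto_limpo ch "") texto

-- ===== PORT B =====
-- B's set of special characters: set('*_`\\[]()~>#+-=|{}.!')
def pvEspeciaisSet : PySem.Set Char :=
  PySem.Set.ofList "*_`\\[]()~>#+-=|{}.!".toList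

def limpar_formatacao_markdown_py_alt (texto : String) : String :=
  String.ofList (texto.toList.filter (fun c => !(PySem.Set.contains pvEspeciaisSet c)))

-- ===== PRECONDITION & SPEC =====
def Spec_limpar_formatacao_markdown_py (texto : String) (out : String) : Prop := out = limpar_formatacao_markdown_py_alt texto
instance (texto : String) (out : String) : Decidable (Spec_limpar_formatacao_markdown_py texto out) := by unfold Spec_limpar_formatacao_markdown_py; infer_instance

-- ===== CLAIM (what is proved, stated in full; the proofs are below) =====
def Claim_equal_limpar_formatacao_markdown_py : Prop := ∀ (texto : String), Dom_limpar_formatacao_markdown_py texto → Spec_limpar_formatacao_markdown_py texto (limpar_formatacao_markdown_py texto)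

-- ===== LEMMAS AND PROOFS =====

-- replace.go with old = [c], new = [] and enough fuel removes every occurrence of c.
theorem pv_go_filter (c : Char) :
    ∀ (fuel : Nat) (l acc : List Char), l.length ≤ fuel →
      PySem.Chars.replace.go [c] [] fuel l acc
        = acc.reverse ++ l.filter (fun x => x != c) := by
  intro fuel
  induction fuel with
  | zero =>
    intro l acc h
    have hl : l = [] := List.length_eq_zero_iff.mp (Nat.le_zero.mp h)
    subst hl
    simp [PySem.Chars.replace.go]
  | succ n ih =>
    intro l acc h
    cases l with
    | nil => simp [PySem.Chars.replace.go]
    | cons c' t =>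
      simp only [PySem.Chars.replace.go]
      by_cases hc : c = c'
      · subst hc
        have : List.isPrefixOf [c] (c :: t) = true := by
          simp [List.isPrefixOf]
        rw [this]
        simp only [if_true]
        have ht : t.length ≤ n := by simpa using h
        rw [show List.drop [c].length (c :: t) = t from rfl,
            show ([] : List Char).reverse ++ acc = acc from rfl, ih _ _ ht]
        simp [List.filter]
      · have : List.isPrefixOf [c] (c' :: t) = false := by
          simp [List.isPrefixOf, hc]
        rw [this]
        simp only [Bool.false_eq_true, if_false]
        have ht : t.length ≤ n := by simpa using h
        rw [ih _ _ ht]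
        simp [bne, Ne.symm hc]

theorem pv_replace_char (s : List Char) (c : Char) :
    PySem.Chars.replace s [c] [] = s.filter (fun x => x != c) := by
  unfold PySem.Chars.replace
  simp only [List.isEmpty_cons, Bool.false_eq_true, if_false]
  simpa using pv_go_filter c s.length s [] (le_refl _)

-- One fold step over a list of characters = filtering out all of them at once.
theorem pv_fold_filter (cs : List Char) :
    ∀ (s : String),
      (cs.foldl (fun acc c => PySem.Str.replace acc (String.ofList [c]) "") s).toList
        = s.toList.filter (fun x => !(cs.contains x)) := by
  induction cs with
  | nil => intro s; simp
  | cons c cs ih =>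
    intro s
    simp only [List.foldl_cons]
    rw [ih]
    have h1 : (PySem.Str.replace s (String.ofList [c]) "").toList
        = s.toList.filter (fun x => x != c) := by
      rw [PySem.Str.toList_replace]
      rw [show (String.ofList [c]).toList = [c] from String.toList_ofList,
          show ("" : String).toList = [] from rfl]
      exact pv_replace_char s.toList c
    rw [h1, List.filter_filter]
    apply List.filter_congr
    intro x _
    by_cases hx : c = x
    · subst hx; simp
    · simp [Ne.symm hx, Bool.and_comm]

theorem pv_A_list_eq_map :
    pvCaracteresEspeciais
      = ("*_`\\[]()~>#+-=|{}.!".toList).map (fun c => String.ofList [c]) := by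
  decide

-- ===== VERDICT (by name: the statement is the Claim_ definition above) =====
theorem limpar_formatacao_markdown_py_spec : Claim_equal_limpar_formatacao_markdown_py := by
  intro texto _
  unfold Spec_limpar_formatacao_markdown_py
  apply String.toList_inj.mp
  unfold limpar_formatacao_markdown_py limpar_formatacao_markdown_py_alt
  rw [pv_A_list_eq_map, List.foldl_map, pv_fold_filter, String.toList_ofList,
      String.toList_ofList]
  have he : pvEspeciaisSet
      = ['*', '_', '`', '\\', '[', ']', '(', ')', '~', '>', '#', '+', '-', '=', '|', '{', '}', '.', '!'] := by
    decide
  rw [he]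
  apply List.filter_congr
  intro x _
  simp [PySem.Set.contains]
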